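-- pv_equiv track=rewrite | github.com/jasyip/frenchverbs | filter_list.py | filter_def
-- ===== SOURCE A (Python) =====
-- from queue import PriorityQueue
-- import string
--
-- class State:
--     def __init__(self, words, length, word_length):
--         self.words = words
--         self.length = length
--         self.word_length = word_length
--
--     def copy(self):
--         return State(self.words.copy(), self.length, self.word_length)
--
--     def insert(self, word):
--         for cur_word in self.words:
--             if word in cur_word or cur_word in word:
--                 break
--         else:
--             self.words.append(word)
--             self.word_length += len(list(c for c in word if c not in string.whitespace))
--         self.length += 1
--
--     def __repr__(self):
--         return repr((self.words, self.length, self.word_length))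
--
--     def __len__(self):
--         return self.word_length
--
--     def __lt__(self, other):
--         if len(self) == len(other):
--             return self.words < other.words
--         return len(self) < len(other)
--
-- def filter_def(def_list):
--     pq = PriorityQueue()
--     pq.put(State([], 0, 0))
--
--     while pq:
--         cur = pq.get()
--         idx = cur.length
--
--         if idx == len(def_list):
--             return cur.words
--         else:
--             for word in def_list[idx]:
--                 nxt_state = cur.copy()
--                 nxt_state.insert(word)
--                 pq.put(nxt_state)
--
--     return []
-- ===== SOURCE B (Python) =====
-- import itertools
-- import string
--
--
-- def filter_def(def_list):
--     # Exhaustively try every one-word-per-slot combination; keep the one whose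
--     # deduplicated word list minimizes (non-whitespace length, words) -- the
--     # same key A's best-first search orders states by.
--     best = None
--     for combo in itertools.product(*def_list):
--         words = []
--         for word in combo:
--             if not any(word in cur or cur in word for cur in words):
--                 words.append(word)
--         word_length = sum(1 for w in words for c in w if c not in string.whitespace)
--         key = (word_length, words)
--         if best is None or key < best:
--             best = key
--     return best[1]
-- ===== Notes on version B (the rewrite author's own statement) =====
-- stated objective: simpler
-- what changed: Replaces A's PriorityQueue best-first search over partial States with a direct scan of every one-word-per-slot combination (itertools.product), keeping the deduplicated word list minimal under the same (non-whitespace length, words) key.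
import Mathlib
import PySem

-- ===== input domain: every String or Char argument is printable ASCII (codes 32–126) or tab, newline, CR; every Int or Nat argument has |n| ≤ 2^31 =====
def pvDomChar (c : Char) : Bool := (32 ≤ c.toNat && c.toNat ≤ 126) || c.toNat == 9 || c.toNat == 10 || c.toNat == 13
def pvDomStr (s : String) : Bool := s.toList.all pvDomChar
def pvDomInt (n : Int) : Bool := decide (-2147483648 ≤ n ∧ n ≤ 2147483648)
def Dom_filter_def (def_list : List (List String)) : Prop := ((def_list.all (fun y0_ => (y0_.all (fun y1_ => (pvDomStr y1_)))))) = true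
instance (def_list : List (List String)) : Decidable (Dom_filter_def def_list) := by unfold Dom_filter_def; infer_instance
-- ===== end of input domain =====

-- B drops A's best-first priority-queue search and instead scans every one-word-per-slot
-- combination (itertools.product), returning the deduplicated word list minimal under the
-- key (non-whitespace length, words) that A's State.__lt__ orders states by (objective: simpler).

-- ===== PORT A =====

-- shared character/word helpers (identical logic in both Python versions)
-- c in string.whitespace  (string.whitespace = ' \t\n\r\x0b\x0c')
def pvIsWs (c : Char) : Bool :=
  c == ' ' || c == '\t' || c == '\n' || c == '\r' || c == Char.ofNat 11 || c == Char.ofNat 12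
-- len(list(c for c in word if c not in string.whitespace))
def pvNws (w : String) : Nat := (w.toList.filter (fun c => !pvIsWs c)).length
-- word in cur_word or cur_word in word
def pvRelated (w cur : String) : Bool := PySem.Str.isIn w cur || PySem.Str.isIn cur w

-- Python list-of-str comparison self.words < other.words (lexicographic, prefix smaller)
def ltWords : List String → List String → Bool
  | _, [] => false
  | [], _ :: _ => true
  | a :: as, b :: bs => if a < b then true else if b < a then false else ltWords as bs

-- comparison on the (word_length, words) key: State.__lt__ / Python tuple comparison
def kLt (a b : Nat × List String) : Bool :=
  if a.1 = b.1 then ltWords a.2 b.2 else decide (a.1 < b.1)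

structure PyState where
  words : List String
  length : Nat
  wordLength : Nat
deriving DecidableEq, Repr

-- State.insert
def stInsert (s : PyState) (w : String) : PyState :=
  if s.words.any (fun cur => pvRelated w cur) then
    { s with length := s.length + 1 }
  else
    { words := s.words ++ [w], length := s.length + 1,
      wordLength := s.wordLength + pvNws w }

-- State.__lt__
def ltState (s t : PyState) : Bool := kLt (s.wordLength, s.words) (t.wordLength, t.words)

-- PriorityQueue.get: remove the first minimal element (returns it and the rest)
def popMin (x : PyState) : List PyState → PyState × List PyState
  | [] => (x, [])
  | y :: rest =>
    if ltState y x then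
      let p := popMin y rest; (p.1, x :: p.2)
    else
      let p := popMin x rest; (p.1, y :: p.2)

-- the while loop; fuel only makes the recursion structural (proved sufficient under Pre_)
def loopA (d : List (List String)) : Nat → List PyState → List String
  | 0, _ => []
  | _ + 1, [] => []
  | f + 1, x :: rest =>
    let p := popMin x rest
    if p.1.length = d.length then p.1.words
    else loopA d f (p.2 ++ (d.getD p.1.length []).map (fun w => stInsert p.1 w))

def pvMaxSlot (d : List (List String)) : Nat := d.foldl (fun m s => max m s.length) 0

def filter_def (def_list : List (List String)) : List String :=
  loopA def_list ((pvMaxSlot def_list + 1) ^ def_list.length + 1) [⟨[], 0, 0⟩]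

-- ===== PORT B =====

-- itertools.product(*def_list)
def pvCombos : List (List String) → List (List String)
  | [] => [[]]
  | s :: rest => s.flatMap (fun w => (pvCombos rest).map (fun c => w :: c))

def filter_def_alt (def_list : List (List String)) : List String :=
  let best := (pvCombos def_list).foldl (fun best c =>
    let words := c.foldl
      (fun ws w => if ws.any (fun cur => pvRelated w cur) then ws else ws ++ [w]) []
    let wl := (words.map pvNws).sum
    match best with
    | none => some (wl, words)
    | some b => if kLt (wl, words) b then some (wl, words) else some b) none
  match best with
  | some b => b.2
  | none => []   -- unreachable under Pre_ (the Python raises here)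

-- ===== PRECONDITION & SPEC =====
-- Pre_ excludes def_lists containing an empty slot: there A's 'while pq' loop never
-- terminates (queue.PriorityQueue is always truthy, get() blocks forever), and B raises.
def Pre_filter_def (def_list : List (List String)) : Prop := ∀ s ∈ def_list, s ≠ []
instance (def_list : List (List String)) : Decidable (Pre_filter_def def_list) := by
  unfold Pre_filter_def; infer_instance

def pvWitness_filter_def : List (List String) := [["le", "chat"], ["chaton", "dog"]]

def Spec_filter_def (def_list : List (List String)) (out : List String) : Prop := out = filter_def_alt def_list
instance (def_list : List (List String)) (out : List String) : Decidable (Spec_filter_def def_list out) := by unfold Spec_filter_def; infer_instance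

-- ===== CLAIM (what is proved, stated in full; the proofs are below) =====
def Claim_equal_filter_def : Prop := ∀ (def_list : List (List String)), Dom_filter_def def_list → Pre_filter_def def_list → Spec_filter_def def_list (filter_def def_list)

-- ===== LEMMAS AND PROOFS =====

-- ---- order lemmas for ltWords / kLt ----
theorem ltWords_irrefl (a : List String) : ltWords a a = false := by
  induction a with
  | nil => rfl
  | cons x xs ih => simp [ltWords, ih]

theorem ltWords_trans {a b c : List String} (h1 : ltWords a b = true)
    (h2 : ltWords b c = true) : ltWords a c = true := by
  induction a generalizing b c with
  | nil =>
    cases b with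
    | nil => simp [ltWords] at h1
    | cons y ys => cases c with
      | nil => simp [ltWords] at h2
      | cons z zs => simp [ltWords]
  | cons x xs ih =>
    cases b with
    | nil => simp [ltWords] at h1
    | cons y ys =>
      cases c with
      | nil => simp [ltWords] at h2
      | cons z zs =>
        rcases lt_trichotomy x y with hxy | hxy | hxy
        · rcases lt_trichotomy y z with hyz | hyz | hyz
          · simp [ltWords, lt_trans hxy hyz]
          · subst hyz; simp [ltWords, hxy]
          · rw [ltWords, if_neg (lt_asymm hyz), if_pos hyz] at h2; exact absurd h2 (by simp)
        · subst hxy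
          rw [ltWords, if_neg (lt_irrefl x), if_neg (lt_irrefl x)] at h1
          rcases lt_trichotomy x z with hxz | hxz | hxz
          · simp [ltWords, hxz]
          · subst hxz
            rw [ltWords, if_neg (lt_irrefl x), if_neg (lt_irrefl x)] at h2 ⊢
            exact ih h1 h2
          · rw [ltWords, if_neg (lt_asymm hxz), if_pos hxz] at h2; exact absurd h2 (by simp)
        · rw [ltWords, if_neg (lt_asymm hxy), if_pos hxy] at h1; exact absurd h1 (by simp)

theorem ltWords_total {a b : List String} (h1 : ltWords a b = false)
    (h2 : ltWords b a = false) : a = b := by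
  induction a generalizing b with
  | nil => cases b with
    | nil => rfl
    | cons y ys => simp [ltWords] at h1
  | cons x xs ih =>
    cases b with
    | nil => simp [ltWords] at h2
    | cons y ys =>
      rcases lt_trichotomy x y with hxy | hxy | hxy
      · rw [ltWords, if_pos hxy] at h1; exact absurd h1 (by simp)
      · subst hxy
        rw [ltWords, if_neg (lt_irrefl x), if_neg (lt_irrefl x)] at h1 h2
        exact congrArg (x :: ·) (ih h1 h2)
      · rw [ltWords, if_pos hxy] at h2; exact absurd h2 (by simp)

theorem kLt_irrefl (a : Nat × List String) : kLt a a = false := by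
  simp [kLt, ltWords_irrefl]

theorem kLt_trans {a b c : Nat × List String} (h1 : kLt a b = true)
    (h2 : kLt b c = true) : kLt a c = true := by
  simp only [kLt] at h1 h2 ⊢
  by_cases e1 : a.1 = b.1 <;> by_cases e2 : b.1 = c.1
  · rw [if_pos e1] at h1; rw [if_pos e2] at h2
    rw [if_pos (e1.trans e2)]; exact ltWords_trans h1 h2
  · rw [if_neg e2] at h2; simp at h2
    rw [if_neg (by omega : ¬ a.1 = c.1)]; simp; omega
  · rw [if_neg e1] at h1; simp at h1
    rw [if_neg (by omega : ¬ a.1 = c.1)]; simp; omega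
  · rw [if_neg e1] at h1; rw [if_neg e2] at h2; simp at h1 h2
    rw [if_neg (by omega : ¬ a.1 = c.1)]; simp; omega

theorem kLt_total {a b : Nat × List String} (h1 : kLt a b = false)
    (h2 : kLt b a = false) : a = b := by
  simp only [kLt] at h1 h2
  by_cases e : a.1 = b.1
  · rw [if_pos e] at h1; rw [if_pos e.symm] at h2
    exact Prod.ext e (ltWords_total h1 h2)
  · rw [if_neg e] at h1; rw [if_neg (Ne.symm e)] at h2; simp at h1 h2; omega

-- if c is not below b and b is not below a then c is not below a
theorem kNlt_trans {a b c : Nat × List String} (h1 : kLt b a = false)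
    (h2 : kLt c b = false) : kLt c a = false := by
  by_contra h
  have hca : kLt c a = true := by simpa using h
  rcases Bool.eq_false_or_eq_true (kLt a b) with hab | hab
  · have := kLt_trans hca hab; simp [this] at h2
  · have hba := kLt_total hab h1
    rw [hba] at hca; simp [hca] at h2

-- ---- key machinery: the (word_length, words) key and its per-word step ----
def keyOf (s : PyState) : Nat × List String := (s.wordLength, s.words)

def stepW (k : Nat × List String) (w : String) : Nat × List String :=
  if k.2.any (fun cur => pvRelated w cur) then k else (k.1 + pvNws w, k.2 ++ [w])

theorem keyOf_stInsert (s : PyState) (w : String) :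
    keyOf (stInsert s w) = stepW (keyOf s) w := by
  simp only [keyOf, stInsert, stepW]
  split <;> rfl

theorem stInsert_length (s : PyState) (w : String) :
    (stInsert s w).length = s.length + 1 := by
  simp only [stInsert]; split <;> rfl

theorem ltState_eq (s t : PyState) : ltState s t = kLt (keyOf s) (keyOf t) := rfl

-- ---- monotonicity of stepW along a combination ----
theorem ltWords_append (ws l : List String) : ltWords (ws ++ l) ws = false := by
  induction ws with
  | nil => cases l <;> rfl
  | cons a ws ih => simpa [ltWords] using ih

theorem kNlt_stepW (k : Nat × List String) (w : String) : kLt (stepW k w) k = false := by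
  unfold stepW
  split
  · exact kLt_irrefl k
  · by_cases h : pvNws w = 0
    · simp [kLt, h, ltWords_append]
    · simp [kLt]; omega

theorem kNlt_foldl (c : List String) (k : Nat × List String) :
    kLt (c.foldl stepW k) k = false := by
  induction c generalizing k with
  | nil => exact kLt_irrefl k
  | cons w c ih =>
    simpa using kNlt_trans (kNlt_stepW k w) (ih (stepW k w))

-- ---- combinations ----
theorem pvCombos_ne_nil (d : List (List String)) (h : ∀ s ∈ d, s ≠ []) :
    pvCombos d ≠ [] := by
  induction d with
  | nil => simp [pvCombos]
  | cons s rest ih =>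
    have hs : s ≠ [] := h s (by simp)
    have hr : pvCombos rest ≠ [] := ih (fun t ht => h t (by simp [ht]))
    cases s with
    | nil => exact absurd rfl hs
    | cons w ws =>
      cases hc : pvCombos rest with
      | nil => exact absurd hc hr
      | cons c cs => simp [pvCombos, hc]

-- ---- extension keys of a queue state ----
def extK (d : List (List String)) (s : PyState) : List (Nat × List String) :=
  (pvCombos (d.drop s.length)).map (fun c => c.foldl stepW (keyOf s))

def QK (d : List (List String)) (q : List PyState) : List (Nat × List String) :=
  q.flatMap (extK d)

def allK (d : List (List String)) : List (Nat × List String) :=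
  (pvCombos d).map (fun c => c.foldl stepW (0, []))

theorem extK_complete {d : List (List String)} {s : PyState}
    (h : s.length = d.length) : extK d s = [keyOf s] := by
  simp [extK, h, List.drop_length, pvCombos]

theorem extK_expand {d : List (List String)} {s : PyState}
    (h : s.length < d.length) :
    extK d s = (d.getD s.length []).flatMap (fun w => extK d (stInsert s w)) := by
  have hd : d.drop s.length = d[s.length] :: d.drop (s.length + 1) :=
    List.drop_eq_getElem_cons h
  have hg : d.getD s.length [] = d[s.length] := List.getD_eq_getElem d [] h
  rw [extK, hd, pvCombos, List.map_flatMap, hg]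
  congr 1
  funext w
  rw [List.map_map, extK, stInsert_length]
  congr 1
  funext c
  simp [Function.comp, keyOf_stInsert]

theorem QK_perm {d : List (List String)} {q q' : List PyState} (h : q.Perm q') :
    (QK d q).Perm (QK d q') := List.Perm.flatMap_right _ h

theorem QK_root (d : List (List String)) : QK d [⟨[], 0, 0⟩] = allK d := by
  simp [QK, extK, allK, keyOf]

-- ---- minimality ----
def KMin (v : Nat × List String) (l : List (Nat × List String)) : Prop :=
  v ∈ l ∧ ∀ u ∈ l, kLt u v = false

theorem KMin_unique {v w : Nat × List String} {l : List (Nat × List String)}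
    (h1 : KMin v l) (h2 : KMin w l) : v = w :=
  kLt_total (h2.2 v h1.1) (h1.2 w h2.1)

theorem KMin_perm {v : Nat × List String} {l l' : List (Nat × List String)}
    (p : l.Perm l') (h : KMin v l) : KMin v l' :=
  ⟨p.subset h.1, fun u hu => h.2 u (p.symm.subset hu)⟩

-- ---- popMin: returns a minimal element, and only permutes the queue ----
theorem popMin_perm (x : PyState) (q : List PyState) :
    ((popMin x q).1 :: (popMin x q).2).Perm (x :: q) := by
  induction q generalizing x with
  | nil => simp [popMin]
  | cons y rest ih =>
    by_cases h : ltState y x = true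
    · simp only [popMin, h, if_true]
      exact (List.Perm.swap x _ _).trans ((ih y).cons x)
    · simp only [popMin, h, if_false, Bool.false_eq_true]
      exact ((List.Perm.swap y _ _).trans ((ih x).cons y)).trans (List.Perm.swap x y rest)

theorem popMin_min (x : PyState) (q : List PyState) :
    ∀ t ∈ x :: q, ltState t (popMin x q).1 = false := by
  induction q generalizing x with
  | nil =>
    intro t ht; simp at ht; subst ht
    simp [popMin, ltState_eq, kLt_irrefl]
  | cons y rest ih =>
    intro t ht
    by_cases h : ltState y x = true
    · have hp : (popMin x (y :: rest)).1 = (popMin y rest).1 := by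
        simp [popMin, h]
      rw [hp]
      rcases List.mem_cons.mp ht with rfl | ht2
      · have h1 := ih y y (by simp)
        rw [ltState_eq] at h h1 ⊢
        rcases Bool.eq_false_or_eq_true (kLt (keyOf t) (keyOf (popMin y rest).1)) with hg | hg
        · have := kLt_trans h hg
          simp [this] at h1
        · exact hg
      · exact ih y t ht2
    · have hp : (popMin x (y :: rest)).1 = (popMin x rest).1 := by
        simp [popMin, h]
      rw [hp]
      rcases List.mem_cons.mp ht with rfl | ht2
      · exact ih t t (by simp)
      rcases List.mem_cons.mp ht2 with rfl | ht3
      · have hxp := ih x x (by simp)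
        rw [ltState_eq] at h hxp ⊢
        exact kNlt_trans hxp (by simpa using h)
      · exact ih x t (by simp [ht3])

-- ---- the termination measure ----
def wt (d : List (List String)) (s : PyState) : Nat :=
  (pvMaxSlot d + 1) ^ (d.length - s.length)

def meas (d : List (List String)) (q : List PyState) : Nat := (q.map (wt d)).sum

theorem meas_perm {d : List (List String)} {q q' : List PyState} (h : q.Perm q') :
    meas d q = meas d q' := List.Perm.sum_nat (h.map (wt d))

theorem mem_le_foldl_max {s : List String} {d : List (List String)} (h : s ∈ d) :
    ∀ init : Nat, s.length ≤ d.foldl (fun m t => max m t.length) init := by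
  induction d with
  | nil => simp at h
  | cons t rest ih =>
    intro init
    rcases List.mem_cons.mp h with rfl | h2
    · have : ∀ d' : List (List String), ∀ i : Nat,
          i ≤ d'.foldl (fun m t => max m t.length) i := by
        intro d'
        induction d' with
        | nil => intro i; simp
        | cons u r ihr =>
          intro i
          exact le_trans (le_max_left i u.length) (ihr (max i u.length))
      exact le_trans (le_max_right init s.length) (this rest (max init s.length))
    · exact ih h2 (max init t.length)

theorem slot_le_max {d : List (List String)} {s : List String} (h : s ∈ d) :
    s.length ≤ pvMaxSlot d := mem_le_foldl_max h 0

theorem pv_sum_map_const {α : Type} (l : List α) (c : Nat) :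
    (l.map (fun _ => c)).sum = l.length * c := by
  induction l with
  | nil => simp
  | cons a l ih => simp [Nat.succ_mul]; omega

theorem meas_children {d : List (List String)} {m : PyState}
    (hlt : m.length < d.length) :
    meas d ((d.getD m.length []).map (fun w => stInsert m w)) < wt d m := by
  have hg : d.getD m.length [] = d[m.length] := List.getD_eq_getElem d [] hlt
  have hslot : (d[m.length]).length ≤ pvMaxSlot d :=
    slot_le_max (List.getElem_mem hlt)
  have hwt : ∀ w, wt d (stInsert m w) =
      (pvMaxSlot d + 1) ^ (d.length - m.length - 1) := by
    intro w
    rw [wt, stInsert_length]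
    congr 1
  rw [meas, hg, List.map_map]
  have hmapc : (d[m.length]).map (wt d ∘ fun w => stInsert m w) =
      (d[m.length]).map (fun _ => (pvMaxSlot d + 1) ^ (d.length - m.length - 1)) :=
    List.map_congr_left (fun w _ => hwt w)
  rw [hmapc, pv_sum_map_const]
  have hnl : d.length - m.length = (d.length - m.length - 1) + 1 := by omega
  rw [wt, hnl, pow_succ]
  have hpos : 0 < (pvMaxSlot d + 1) ^ (d.length - m.length - 1) :=
    pow_pos (by omega) _
  calc (d[m.length]).length * (pvMaxSlot d + 1) ^ (d.length - m.length - 1)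
      ≤ pvMaxSlot d * (pvMaxSlot d + 1) ^ (d.length - m.length - 1) :=
        Nat.mul_le_mul_right _ hslot
    _ < (pvMaxSlot d + 1) * (pvMaxSlot d + 1) ^ (d.length - m.length - 1) :=
        Nat.mul_lt_mul_of_pos_right (by omega) hpos
    _ = (pvMaxSlot d + 1) ^ (d.length - m.length - 1) * (pvMaxSlot d + 1) :=
        mul_comm _ _

-- ---- B's running-minimum fold ----
theorem foldB (l : List (Nat × List String)) :
    ∀ b : Nat × List String,
      ∃ v, l.foldl (fun best k => match best with
          | none => some k
          | some u => if kLt k u then some k else some u) (some b) = some v ∧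
        KMin v (b :: l) := by
  induction l with
  | nil =>
    intro b
    refine ⟨b, rfl, by simp, ?_⟩
    intro u hu; simp at hu; subst hu; exact kLt_irrefl _
  | cons k l ih =>
    intro b
    by_cases h : kLt k b = true
    · obtain ⟨v, hv, hvmem, hvmin⟩ := ih k
      refine ⟨v, by simpa [h] using hv, List.mem_cons_of_mem b hvmem, ?_⟩
      intro u hu
      rcases List.mem_cons.mp hu with rfl | hu2
      · have hkv := hvmin k (by simp)
        rcases Bool.eq_false_or_eq_true (kLt u v) with hg | hg
        · have := kLt_trans h hg
          simp [this] at hkv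
        · exact hg
      · exact hvmin u hu2
    · obtain ⟨v, hv, hvmem, hvmin⟩ := ih b
      refine ⟨v, by simpa [h] using hv, ?_, ?_⟩
      · rcases List.mem_cons.mp hvmem with rfl | hv2
        · simp
        · simp [hv2]
      · intro u hu
        rcases List.mem_cons.mp hu with rfl | hu2
        · exact hvmin u (by simp)
        rcases List.mem_cons.mp hu2 with rfl | hu3
        · exact kNlt_trans (hvmin b (by simp)) (by simpa using h)
        · exact hvmin u (by simp [hu3])

-- ---- A\'s best-first loop returns the words of the minimal key ----
theorem meas_append (d : List (List String)) (q q' : List PyState) :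
    meas d (q ++ q') = meas d q + meas d q' := by
  simp [meas]

theorem meas_cons (d : List (List String)) (s : PyState) (q : List PyState) :
    meas d (s :: q) = wt d s + meas d q := by
  simp [meas]

theorem loopA_min (d : List (List String)) (hpre : ∀ s ∈ d, s ≠ []) :
    ∀ (f : Nat) (q : List PyState), q ≠ [] → (∀ s ∈ q, s.length ≤ d.length) →
      meas d q < f → (QK d q).Perm (allK d) →
      ∀ v, KMin v (allK d) → loopA d f q = v.2 := by
  intro f
  induction f with
  | zero => intro q _ _ hm _ _ _; omega
  | succ f ih =>
    intro q hq hlen hm hperm v hv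
    cases q with
    | nil => exact absurd rfl hq
    | cons x rest =>
      have hpp := popMin_perm x rest
      have hpm := popMin_min x rest
      by_cases hc : (popMin x rest).1.length = d.length
      · simp only [loopA]
        rw [if_pos hc]
        have hmem : (popMin x rest).1 ∈ x :: rest := hpp.subset (by simp)
        have hkm : KMin (keyOf (popMin x rest).1) (QK d (x :: rest)) := by
          constructor
          · exact List.mem_flatMap.mpr
              ⟨(popMin x rest).1, hmem, by rw [extK_complete hc]; simp⟩
          · intro u hu
            obtain ⟨t, ht, hu2⟩ := List.mem_flatMap.mp hu
            obtain ⟨c, _, rfl⟩ := List.mem_map.mp hu2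
            exact kNlt_trans (by rw [← ltState_eq]; exact hpm t ht) (kNlt_foldl c _)
        have := KMin_unique (KMin_perm hperm hkm) hv
        rw [← this]
        rfl
      · have hml : (popMin x rest).1.length ≤ d.length :=
          hlen _ (hpp.subset (by simp))
        have hlt : (popMin x rest).1.length < d.length := lt_of_le_of_ne hml hc
        have hg : d.getD (popMin x rest).1.length [] = d[(popMin x rest).1.length] :=
          List.getD_eq_getElem d [] hlt
        simp only [loopA]
        rw [if_neg hc]
        apply ih
        · apply List.append_ne_nil_of_right_ne_nil
          rw [hg]
          intro hmap
          exact hpre _ (List.getElem_mem hlt) (List.map_eq_nil_iff.mp hmap)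
        · intro s hs
          rcases List.mem_append.mp hs with hs1 | hs2
          · exact hlen s (hpp.subset (List.mem_cons_of_mem _ hs1))
          · obtain ⟨w, _, rfl⟩ := List.mem_map.mp hs2
            rw [stInsert_length]; omega
        · have h1 := meas_append d (popMin x rest).2
            ((d.getD (popMin x rest).1.length []).map (fun w => stInsert (popMin x rest).1 w))
          have h2 : meas d ((popMin x rest).1 :: (popMin x rest).2) = meas d (x :: rest) :=
            meas_perm hpp
          have h3 := meas_children hlt
          rw [meas_cons] at h2
          omega
        · have hQ : QK d ((popMin x rest).2 ++
              ((d.getD (popMin x rest).1.length []).map (fun w => stInsert (popMin x rest).1 w))) =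
              QK d (popMin x rest).2 ++ extK d (popMin x rest).1 := by
            rw [QK, List.flatMap_append, extK_expand hlt, ← List.flatMap_map (fun w => stInsert (popMin x rest).1 w) (extK d)]
            rfl
          rw [hQ]
          refine (List.perm_append_comm.trans ?_)
          have : extK d (popMin x rest).1 ++ QK d (popMin x rest).2 =
              QK d ((popMin x rest).1 :: (popMin x rest).2) := by
            simp [QK]
          rw [this]
          exact (QK_perm hpp).trans hperm
        · exact hv

-- ---- B computes a minimal key of allK ----
theorem fold_key (c : List String) : ∀ ws : List String,
    c.foldl stepW (((ws.map pvNws).sum), ws) =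
      (((c.foldl (fun ws w => if ws.any (fun cur => pvRelated w cur) then ws
          else ws ++ [w]) ws).map pvNws).sum,
        c.foldl (fun ws w => if ws.any (fun cur => pvRelated w cur) then ws
          else ws ++ [w]) ws) := by
  induction c with
  | nil => intro ws; simp
  | cons w c ihc =>
    intro ws
    simp only [List.foldl_cons]
    by_cases h : ws.any (fun cur => pvRelated w cur)
    · simp only [stepW, h, if_true]
      exact ihc ws
    · simp only [stepW, h, Bool.false_eq_true, if_false]
      have hs : ((ws ++ [w]).map pvNws).sum = (ws.map pvNws).sum + pvNws w := by
        simp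
      rw [← hs]
      exact ihc (ws ++ [w])

theorem filter_alt_min (d : List (List String)) (hpre : ∀ s ∈ d, s ≠ []) :
    ∃ v, KMin v (allK d) ∧ filter_def_alt d = v.2 := by
  have hcongr : (fun (best : Option (Nat × List String)) (c : List String) =>
      (let words := c.foldl (fun ws w => if ws.any (fun cur => pvRelated w cur) then ws
        else ws ++ [w]) []
       let wl := (words.map pvNws).sum
       match best with
       | none => some (wl, words)
       | some b => if kLt (wl, words) b then some (wl, words) else some b)) =
      (fun (best : Option (Nat × List String)) (c : List String) =>
       match best with
       | none => some (c.foldl stepW (0, []))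
       | some u => if kLt (c.foldl stepW (0, [])) u then some (c.foldl stepW (0, []))
         else some u) := by
    funext best c
    have hk := fold_key c []
    simp only [List.map_nil, List.sum_nil] at hk
    dsimp only
    rw [← hk]
  have hfold : filter_def_alt d = (match (allK d).foldl (fun best k =>
      match best with
      | none => some k
      | some u => if kLt k u then some k else some u) none with
      | some b => b.2
      | none => []) := by
    rw [filter_def_alt, allK, List.foldl_map, hcongr]
  cases hcl : pvCombos d with
  | nil => exact absurd hcl (pvCombos_ne_nil d hpre)
  | cons c0 cs =>
    have hall : allK d = c0.foldl stepW (0, []) ::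
        cs.map (fun c => c.foldl stepW (0, [])) := by
      rw [allK, hcl, List.map_cons]
    obtain ⟨v, hv, hvmin⟩ := foldB (cs.map (fun c => c.foldl stepW (0, [])))
      (c0.foldl stepW (0, []))
    refine ⟨v, by rw [hall]; exact hvmin, ?_⟩
    rw [hfold, hall]
    simp only [List.foldl_cons]
    rw [hv]

-- ===== VERDICT (by name: the statement is the Claim_ definition above) =====
theorem filter_def_spec : Claim_equal_filter_def := by
  intro d _ hpre
  unfold Spec_filter_def
  obtain ⟨v, hvmin, hb⟩ := filter_alt_min d hpre
  rw [hb, filter_def]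
  apply loopA_min d hpre
  · simp
  · intro s hs; simp at hs; subst hs; exact Nat.zero_le _
  · rw [meas_cons]
    simp [meas, wt]
  · rw [QK_root]
  · exact hvmin
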